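-- pv_equiv track=rewrite | github.com/zazabap/problem-reductions | docs/paper/verify-reductions/verify_nae_satisfiability_partition_into_perfect_matchings.py | is_valid_partition
-- ===== SOURCE A (Python) =====
-- from collections import defaultdict
--
-- def is_valid_partition(edges, num_verts, K, config):
--     """Check if config is a valid K-perfect-matching partition."""
--     if len(config) != num_verts:
--         return False
--     if any(c < 0 or c >= K for c in config):
--         return False
--
--     # Build adjacency
--     adj = defaultdict(set)
--     for u, v in edges:
--         adj[u].add(v)
--         adj[v].add(u)
--
--     for group in range(K):
--         members = [v for v in range(num_verts) if config[v] == group]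
--         if not members:
--             continue
--         if len(members) % 2 != 0:
--             return False
--         for v in members:
--             same_group_neighbors = sum(1 for u in adj[v] if config[u] == group)
--             if same_group_neighbors != 1:
--                 return False
--     return True
-- ===== SOURCE B (Python) =====
-- from collections import defaultdict, Counter
--
-- def is_valid_partition(edges, num_verts, K, config):
--     """Check if config is a valid K-perfect-matching partition."""
--     if len(config) != num_verts:
--         return False
--     if any(c < 0 or c >= K for c in config):
--         return False
--
--     # One pass over the deduplicated edge set, keeping per-vertex degree
--     # counters of same-group incidences (a self-loop counts once).
--     deg = defaultdict(int)
--     for e in {frozenset(p) for p in edges}: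
--         if len(e) == 1:
--             (u,) = e
--             deg[u] += 1
--         else:
--             u, v = e
--             if config[u] == config[v]:
--                 deg[u] += 1
--                 deg[v] += 1
--
--     # Every non-empty group must have even size, every vertex degree exactly 1.
--     if any(cnt % 2 != 0 for cnt in Counter(config).values()):
--         return False
--     return all(deg[v] == 1 for v in range(num_verts))
-- ===== Notes on version B (the rewrite author's own statement) =====
-- stated objective: alternative
-- what changed: Replaces A's per-group member lists with per-member adjacency scans by a single pass over the deduplicated edge set maintaining per-vertex same-group degree counters, plus a Counter-based group-parity check.
-- outside the precondition, e.g. on is_valid_partition([(5, 6)], 1, 1, [0]): A returns False, B raises IndexError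
import Mathlib
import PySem

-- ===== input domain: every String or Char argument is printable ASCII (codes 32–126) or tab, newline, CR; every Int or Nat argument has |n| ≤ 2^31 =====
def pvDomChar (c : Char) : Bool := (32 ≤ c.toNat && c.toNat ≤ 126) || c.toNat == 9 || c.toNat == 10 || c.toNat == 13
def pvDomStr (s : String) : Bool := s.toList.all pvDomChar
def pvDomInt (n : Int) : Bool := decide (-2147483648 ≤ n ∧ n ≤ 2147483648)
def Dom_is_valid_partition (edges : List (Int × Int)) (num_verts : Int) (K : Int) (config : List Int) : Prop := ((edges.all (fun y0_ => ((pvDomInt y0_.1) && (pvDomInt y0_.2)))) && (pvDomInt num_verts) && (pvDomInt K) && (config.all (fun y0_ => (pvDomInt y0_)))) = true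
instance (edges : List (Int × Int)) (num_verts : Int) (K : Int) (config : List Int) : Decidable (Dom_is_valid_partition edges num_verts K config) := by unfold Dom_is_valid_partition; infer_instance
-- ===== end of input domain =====

-- B replaces A's per-group member lists with per-member adjacency scans by one
-- pass over the deduplicated edge set keeping per-vertex same-group degree
-- counters, plus a Counter-based group-parity check (objective: alternative).

-- ===== PORT A =====
-- adj = defaultdict(set); for u, v in edges: adj[u].add(v); adj[v].add(u)
def pvA_adj (edges : List (Int × Int)) : PySem.Dict Int (PySem.Set Int) :=
  edges.foldl (fun adj e =>
    (adj.insert e.1 (PySem.Set.add (adj.getD e.1 PySem.Set.empty) e.2)).insert e.2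
      (PySem.Set.add ((adj.insert e.1 (PySem.Set.add (adj.getD e.1 PySem.Set.empty) e.2)).getD
        e.2 PySem.Set.empty) e.1))
    PySem.Dict.empty

-- the 'for group in range(K)' loop with its early returns, recursing over the group list
def pvA_loop (adj : PySem.Dict Int (PySem.Set Int)) (config : List Int)
    (num_verts : Int) : List Int → Bool
  | [] => true
  | g :: gs =>
    let members := (PySem.List.pyRange 0 num_verts 1).filter
      (fun v => PySem.List.pyGet? config v == some g)
    if members.isEmpty then pvA_loop adj config num_verts gs
    else if members.length % 2 ≠ 0 then false
    else if members.all (fun v =>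
        -- sum(1 for u in adj[v] if config[u] == group) == 1; the 0/1-sum is a countP
        ((adj.getD v PySem.Set.empty).countP
          (fun u => PySem.List.pyGet? config u == some g)) == 1) then
      pvA_loop adj config num_verts gs
    else false

def is_valid_partition (edges : List (Int × Int)) (num_verts : Int) (K : Int) (config : List Int) : Bool :=
  if (config.length : Int) ≠ num_verts then false
  else if config.any (fun c => decide (c < 0) || decide (K ≤ c)) then false
  else pvA_loop (pvA_adj edges) config num_verts (PySem.List.pyRange 0 K 1)

-- ===== PORT B =====
-- frozenset({u, v}) represented as the sorted endpoint pair (a singleton becomes (u, u))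
def pvB_norm (p : Int × Int) : Int × Int := if p.1 ≤ p.2 then p else (p.2, p.1)

-- {frozenset(p) for p in edges}
def pvB_edgeSet (edges : List (Int × Int)) : PySem.Set (Int × Int) :=
  PySem.Set.ofList (edges.map pvB_norm)

-- deg = defaultdict(int); one pass over the edge set
def pvB_deg (config : List Int) (es : List (Int × Int)) : PySem.Dict Int Int :=
  es.foldl (fun d e =>
    if e.1 = e.2 then d.modify e.1 0 (· + 1)
    else if PySem.List.pyGet? config e.1 == PySem.List.pyGet? config e.2 then
      (d.modify e.1 0 (· + 1)).modify e.2 0 (· + 1)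
    else d) PySem.Dict.empty

def is_valid_partition_alt (edges : List (Int × Int)) (num_verts : Int) (K : Int) (config : List Int) : Bool :=
  if (config.length : Int) ≠ num_verts then false
  else if config.any (fun c => decide (c < 0) || decide (K ≤ c)) then false
  else if (PySem.Dict.counter config).values.any (fun cnt => PySem.Int.mod cnt 2 ≠ 0) then false
  else (PySem.List.pyRange 0 num_verts 1).all
    (fun v => (pvB_deg config (pvB_edgeSet edges)).getD v 0 == 1)

-- ===== PRECONDITION & SPEC =====
-- Pre_ excludes the inputs that pass A's two guards but carry an edge endpoint
-- outside [-num_verts, num_verts): there config[endpoint] is an IndexError, which A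
-- hits for every such endpoint adjacent to a vertex (it may return False first only
-- when an earlier group already fails), and B's natural single pass always hits it.
def Pre_is_valid_partition (edges : List (Int × Int)) (num_verts : Int) (K : Int) (config : List Int) : Prop :=
  ((config.length : Int) = num_verts ∧ ∀ c ∈ config, 0 ≤ c ∧ c < K) →
  ∀ p ∈ edges, (-num_verts ≤ p.1 ∧ p.1 < num_verts) ∧ (-num_verts ≤ p.2 ∧ p.2 < num_verts)
instance (edges : List (Int × Int)) (num_verts : Int) (K : Int) (config : List Int) : Decidable (Pre_is_valid_partition edges num_verts K config) := by unfold Pre_is_valid_partition; infer_instance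

def pvWitness_is_valid_partition : (List (Int × Int)) × Int × Int × List Int :=
  ([(0, 1)], 2, 1, [0, 0])

def Spec_is_valid_partition (edges : List (Int × Int)) (num_verts : Int) (K : Int) (config : List Int) (out : Bool) : Prop := out = is_valid_partition_alt edges num_verts K config
instance (edges : List (Int × Int)) (num_verts : Int) (K : Int) (config : List Int) (out : Bool) : Decidable (Spec_is_valid_partition edges num_verts K config out) := by unfold Spec_is_valid_partition; infer_instance

-- ===== CLAIM (what is proved, stated in full; the proofs are below) =====
def Claim_equal_is_valid_partition : Prop := ∀ (edges : List (Int × Int)) (num_verts : Int) (K : Int) (config : List Int), Dom_is_valid_partition edges num_verts K config → Pre_is_valid_partition edges num_verts K config → Spec_is_valid_partition edges num_verts K config (is_valid_partition edges num_verts K config)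



-- ===== LEMMAS AND PROOFS =====

-- names for the pieces of A's group check
def pvMembers (config : List Int) (num_verts g : Int) : List Int :=
  (PySem.List.pyRange 0 num_verts 1).filter (fun v => PySem.List.pyGet? config v == some g)

def pvCnt (adj : PySem.Dict Int (PySem.Set Int)) (config : List Int) (g v : Int) : Nat :=
  (adj.getD v PySem.Set.empty).countP (fun u => PySem.List.pyGet? config u == some g)

def pvGroupOK (adj : PySem.Dict Int (PySem.Set Int)) (config : List Int) (num_verts g : Int) : Bool :=
  (pvMembers config num_verts g).isEmpty ||
    (!decide ((pvMembers config num_verts g).length % 2 ≠ 0) &&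
      (pvMembers config num_verts g).all (fun v => pvCnt adj config g v == 1))

-- the contribution of one deduplicated edge to B's degree counter of vertex v
def pvContrib (config : List Int) (v : Int) (e : Int × Int) : Bool :=
  if e.1 = e.2 then decide (e.1 = v)
  else if PySem.List.pyGet? config e.1 == PySem.List.pyGet? config e.2 then
    (decide (e.1 = v) || decide (e.2 = v))
  else false

theorem pv_loop_eq (adj : PySem.Dict Int (PySem.Set Int)) (config : List Int)
    (num_verts : Int) (gs : List Int) :
    pvA_loop adj config num_verts gs = gs.all (pvGroupOK adj config num_verts) := by
  induction gs with
  | nil => rfl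
  | cons g gs ih =>
    simp only [pvA_loop, List.all_cons, ih, pvGroupOK, pvMembers, pvCnt]
    split_ifs with h1 h2 h3 <;> simp_all

theorem pv_groupOK_iff (adj : PySem.Dict Int (PySem.Set Int)) (config : List Int)
    (nv g : Int) :
    pvGroupOK adj config nv g = true ↔
      (pvMembers config nv g = [] ∨ ((pvMembers config nv g).length % 2 = 0 ∧
        ∀ w ∈ pvMembers config nv g, pvCnt adj config g w = 1)) := by
  simp [pvGroupOK, List.isEmpty_iff, List.all_eq_true]

theorem pv_adj_step_mem (adj : PySem.Dict Int (PySem.Set Int)) (e : Int × Int) (v u : Int) :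
    (u ∈ ((adj.insert e.1 (PySem.Set.add (adj.getD e.1 PySem.Set.empty) e.2)).insert e.2
      (PySem.Set.add ((adj.insert e.1 (PySem.Set.add (adj.getD e.1 PySem.Set.empty) e.2)).getD
        e.2 PySem.Set.empty) e.1)).getD v PySem.Set.empty)
      ↔ u ∈ adj.getD v PySem.Set.empty ∨ e = (v, u) ∨ e = (u, v) := by
  rcases e with ⟨a, b⟩
  simp only [PySem.Dict.getD_insert, Prod.mk.injEq]
  split_ifs <;> simp_all <;> tauto

theorem pv_mem_adj (edges : List (Int × Int)) (v u : Int) :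
    u ∈ (pvA_adj edges).getD v PySem.Set.empty ↔ ∃ p ∈ edges, p = (v, u) ∨ p = (u, v) := by
  suffices h : ∀ (l : List (Int × Int)) (adj : PySem.Dict Int (PySem.Set Int)),
      (u ∈ (l.foldl (fun adj e =>
        (adj.insert e.1 (PySem.Set.add (adj.getD e.1 PySem.Set.empty) e.2)).insert e.2
          (PySem.Set.add ((adj.insert e.1 (PySem.Set.add (adj.getD e.1 PySem.Set.empty) e.2)).getD
            e.2 PySem.Set.empty) e.1)) adj).getD v PySem.Set.empty)
        ↔ u ∈ adj.getD v PySem.Set.empty ∨ ∃ p ∈ l, p = (v, u) ∨ p = (u, v) by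
    have h2 := h edges PySem.Dict.empty
    simpa [pvA_adj, PySem.Dict.getD_empty, PySem.Set.empty] using h2
  intro l
  induction l with
  | nil => simp
  | cons e l ih =>
    intro adj
    simp only [List.foldl_cons, ih, pv_adj_step_mem, List.mem_cons]
    constructor
    · rintro ((h | h | h) | ⟨p, hp, h⟩)
      · exact Or.inl h
      · exact Or.inr ⟨e, Or.inl rfl, Or.inl h⟩
      · exact Or.inr ⟨e, Or.inl rfl, Or.inr h⟩
      · exact Or.inr ⟨p, Or.inr hp, h⟩
    · rintro (h | ⟨p, (rfl | hp), h⟩)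
      · exact Or.inl (Or.inl h)
      · exact Or.inl (Or.inr h)
      · exact Or.inr ⟨p, hp, h⟩

theorem pv_adj_nodup (edges : List (Int × Int)) (v : Int) :
    ((pvA_adj edges).getD v PySem.Set.empty).Nodup := by
  suffices h : ∀ (l : List (Int × Int)) (adj : PySem.Dict Int (PySem.Set Int)),
      (∀ w, (adj.getD w PySem.Set.empty).Nodup) →
      ∀ w, ((l.foldl (fun adj e =>
        (adj.insert e.1 (PySem.Set.add (adj.getD e.1 PySem.Set.empty) e.2)).insert e.2
          (PySem.Set.add ((adj.insert e.1 (PySem.Set.add (adj.getD e.1 PySem.Set.empty) e.2)).getD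
            e.2 PySem.Set.empty) e.1)) adj).getD w PySem.Set.empty).Nodup by
    exact h edges PySem.Dict.empty (by simp [PySem.Dict.getD_empty, PySem.Set.empty]) v
  intro l
  induction l with
  | nil => intro adj h w; simpa using h w
  | cons e l ih =>
    intro adj h w
    simp only [List.foldl_cons]
    refine ih _ ?_ w
    intro w'
    simp only [PySem.Dict.getD_insert]
    split_ifs <;>
      first
        | exact h _
        | exact PySem.Set.nodup_add _ _ (h _)
        | exact PySem.Set.nodup_add _ _ (PySem.Set.nodup_add _ _ (h _))

theorem pv_deg_aux (config : List Int) (l : List (Int × Int)) (d : PySem.Dict Int Int) (v : Int) :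
    ((l.foldl (fun d e =>
      if e.1 = e.2 then d.modify e.1 0 (· + 1)
      else if PySem.List.pyGet? config e.1 == PySem.List.pyGet? config e.2 then
        (d.modify e.1 0 (· + 1)).modify e.2 0 (· + 1)
      else d) d).getD v 0) = d.getD v 0 + (l.countP (pvContrib config v) : Int) := by
  induction l generalizing d with
  | nil => simp
  | cons e l ih =>
    have hstep : (if e.1 = e.2 then d.modify e.1 0 (· + 1)
        else if PySem.List.pyGet? config e.1 == PySem.List.pyGet? config e.2 then
          (d.modify e.1 0 (· + 1)).modify e.2 0 (· + 1)
        else d).getD v 0 = d.getD v 0 + (if pvContrib config v e then 1 else 0) := by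
      simp only [pvContrib]
      split_ifs with h1 h2 h3 h4 h5 <;>
        simp_all only [PySem.Dict.getD_modify, decide_eq_true_eq, Bool.or_eq_true,
          not_or] <;>
        (try split_ifs) <;> (try simp_all) <;> (try omega)
    rw [List.foldl_cons, ih, hstep, List.countP_cons]
    by_cases hc : pvContrib config v e = true <;> simp [hc] <;> ring

theorem pv_deg_getD (config : List Int) (edges : List (Int × Int)) (v : Int) :
    (pvB_deg config (pvB_edgeSet edges)).getD v 0
      = ((pvB_edgeSet edges).countP (pvContrib config v) : Int) := by
  unfold pvB_deg
  rw [pv_deg_aux]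
  simp [PySem.Dict.getD_empty]

theorem pv_mem_edgeSet (edges : List (Int × Int)) (e : Int × Int) :
    e ∈ pvB_edgeSet edges ↔ ∃ p ∈ edges, pvB_norm p = e := by
  simp [pvB_edgeSet, PySem.Set.mem_ofList, List.mem_map]

theorem pv_norm_comm (a b : Int) : pvB_norm (a, b) = pvB_norm (b, a) := by
  simp only [pvB_norm]
  split_ifs with h h' h'
  · have hab : a = b := le_antisymm h h'
    subst hab; rfl
  · rfl
  · rfl
  · exfalso; omega

theorem pv_norm_cases (p : Int × Int) : pvB_norm p = p ∨ pvB_norm p = (p.2, p.1) := by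
  simp only [pvB_norm]; split_ifs <;> simp

theorem pv_norm_fst_le (p : Int × Int) : (pvB_norm p).1 ≤ (pvB_norm p).2 := by
  rcases p with ⟨a, b⟩
  simp only [pvB_norm]
  split_ifs with h <;> simp <;> omega

theorem pv_norm_eq {a b u v : Int} (h : pvB_norm (a, b) = pvB_norm (u, v)) :
    (a, b) = (u, v) ∨ (a, b) = (v, u) := by
  simp only [pvB_norm] at h
  split_ifs at h <;> simp_all [Prod.ext_iff]

theorem pv_countP_range (l : List Int) (g : Int) :
    (List.range l.length).countP (fun k => l[k]? == some g) = l.count g := by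
  induction l with
  | nil => simp
  | cons x t ih =>
    rw [List.length_cons, List.range_succ_eq_map, List.countP_cons, List.countP_map]
    have hcomp : ((fun k => (x :: t)[k]? == some g) ∘ Nat.succ) = (fun k => t[k]? == some g) := by
      funext k; simp
    rw [hcomp, ih, List.count_cons]
    simp only [List.getElem?_cons_zero, Option.some.injEq, beq_iff_eq]

theorem pv_length_members (config : List Int) (g : Int) :
    (pvMembers config (config.length : Int) g).length = config.count g := by
  rw [pvMembers, PySem.List.pyRange_zero_nat, List.filter_map, List.length_map,
    ← List.countP_eq_length_filter, ← pv_countP_range config g]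
  apply List.countP_congr
  intro k hk
  simp [Function.comp]

theorem pv_mem_members (config : List Int) (g v : Int) :
    v ∈ pvMembers config (config.length : Int) g
      ↔ 0 ≤ v ∧ v < (config.length : Int) ∧ PySem.List.pyGet? config v = some g := by
  simp only [pvMembers, List.mem_filter, PySem.List.mem_pyRange_one, beq_iff_eq]
  tauto

theorem pv_anyOdd (config : List Int) :
    ((PySem.Dict.counter config).values.any
        (fun cnt => decide (PySem.Int.mod cnt 2 ≠ 0)) = true)
      ↔ ∃ c ∈ config, config.count c % 2 ≠ 0 := by
  simp only [PySem.Dict.values, PySem.Dict.items_counter, List.map_map, List.any_map,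
    List.any_eq_true, Function.comp_def, decide_eq_true_eq, PySem.Set.mem_ofList,
    PySem.Int.mod_eq_emod_of_pos (by norm_num : (0:Int) < 2)]
  constructor <;> rintro ⟨c, hc, h⟩ <;> exact ⟨c, hc, by omega⟩

theorem pv_cnt_eq_deg (edges : List (Int × Int)) (config : List Int) (v g : Int)
    (hg : PySem.List.pyGet? config v = some g) :
    pvCnt (pvA_adj edges) config g v = (pvB_edgeSet edges).countP (pvContrib config v) := by
  classical
  have hnd2 : (pvB_edgeSet edges).Nodup := by
    unfold pvB_edgeSet; exact PySem.Set.nodup_ofList _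
  have hadj : ∀ u : Int, u ∈ (pvA_adj edges).getD v PySem.Set.empty
      ↔ pvB_norm (u, v) ∈ pvB_edgeSet edges := by
    intro u
    rw [pv_mem_adj, pv_mem_edgeSet]
    constructor
    · rintro ⟨p, hp, rfl | rfl⟩
      · exact ⟨(v, u), hp, pv_norm_comm v u⟩
      · exact ⟨(u, v), hp, rfl⟩
    · rintro ⟨⟨a, b⟩, hp, hnorm⟩
      rcases pv_norm_eq hnorm with h | h
      · exact ⟨(a, b), hp, Or.inr h⟩
      · exact ⟨(a, b), hp, Or.inl h⟩
  have hpred : ∀ u : Int, pvContrib config v (pvB_norm (u, v))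
      = (PySem.List.pyGet? config u == some g) := by
    intro u
    by_cases huv : u = v
    · subst huv
      have hn : pvB_norm (u, u) = (u, u) := by simp [pvB_norm]
      simp [hn, pvContrib, hg]
    · rcases pv_norm_cases (u, v) with h | h
      · rw [h]
        simp only [pvContrib]
        rw [if_neg huv, hg]
        by_cases hq : PySem.List.pyGet? config u = some g <;>
          simp [beq_iff_eq, hq, huv]
      · rw [h]
        simp only [pvContrib, hg]
        rw [if_neg (Ne.symm huv)]
        by_cases hq : PySem.List.pyGet? config u = some g
        · simp [hq]
        · have hq2 : some g ≠ PySem.List.pyGet? config u := fun hh => hq hh.symm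
          simp [beq_iff_eq, hq, hq2]
  have hsorted : ∀ e ∈ pvB_edgeSet edges, e.1 ≤ e.2 := by
    intro e he
    rw [pv_mem_edgeSet] at he
    obtain ⟨p, -, rfl⟩ := he
    exact pv_norm_fst_le p
  have hcontrib_v : ∀ e : Int × Int, pvContrib config v e = true → e.1 = v ∨ e.2 = v := by
    intro e h
    simp only [pvContrib] at h
    split_ifs at h with h1 h2
    · simp only [decide_eq_true_eq] at h
      exact Or.inl h
    · simp only [Bool.or_eq_true, decide_eq_true_eq] at h
      exact h
  have hback : ∀ a b : Int, a ≤ b → (a = v ∨ b = v) →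
      pvB_norm ((if a = v then b else a), v) = (a, b) := by
    intro a b hle hab
    rcases hab with rfl | rfl
    · rw [if_pos rfl]
      simp only [pvB_norm]
      by_cases h2 : b ≤ a
      · have hba : b = a := le_antisymm h2 hle
        subst hba
        simp
      · simp [h2]
    · by_cases hav : a = b
      · subst hav
        simp [pvB_norm]
      · rw [if_neg hav]
        simp [pvB_norm, hle]
  unfold pvCnt
  rw [List.countP_eq_length_filter, List.countP_eq_length_filter,
    ← List.toFinset_card_of_nodup (List.Nodup.filter _ (pv_adj_nodup edges v)),
    ← List.toFinset_card_of_nodup (List.Nodup.filter _ hnd2)]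
  refine Finset.card_bij' (fun u _ => pvB_norm (u, v))
    (fun e _ => if e.1 = v then e.2 else e.1) ?_ ?_ ?_ ?_
  · intro u hu
    rw [List.mem_toFinset, List.mem_filter] at hu ⊢
    exact ⟨(hadj u).1 hu.1, by rw [hpred u]; exact hu.2⟩
  · intro e he
    rw [List.mem_toFinset, List.mem_filter] at he ⊢
    obtain ⟨heE, hec⟩ := he
    have hnorm : pvB_norm ((if e.1 = v then e.2 else e.1), v) = e := by
      have h := hback e.1 e.2 (hsorted e heE) (hcontrib_v e hec)
      simpa using h
    constructor
    · exact (hadj _).2 (by rw [hnorm]; exact heE)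
    · have h := hpred (if e.1 = v then e.2 else e.1)
      rw [hnorm] at h
      rw [← h]; exact hec
  · intro u hu
    by_cases huv : u = v
    · have hn : pvB_norm (v, v) = (v, v) := by simp [pvB_norm]
      simp only [huv]
      simp [hn]
    · rcases pv_norm_cases (u, v) with h | h <;> simp [h, huv]
  · intro e he
    rw [List.mem_toFinset, List.mem_filter] at he
    have h := hback e.1 e.2 (hsorted e he.1) (hcontrib_v e he.2)
    simpa using h

-- ===== VERDICT (by name: the statement is the Claim_ definition above) =====
theorem is_valid_partition_spec : Claim_equal_is_valid_partition := by
  intro edges num_verts K config _hDom _hPre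
  unfold Spec_is_valid_partition is_valid_partition is_valid_partition_alt
  by_cases h1 : (config.length : Int) = num_verts
  · by_cases h2 : config.any (fun c => decide (c < 0) || decide (K ≤ c)) = true
    · simp [h1, h2]
    · subst h1
      rw [if_neg (fun h => h rfl), if_neg h2, if_neg (fun h => h rfl), if_neg h2]
      have hall : ∀ c ∈ config, 0 ≤ c ∧ c < K := by
        intro c hc
        rcases lt_or_ge c 0 with h | h
        · exact absurd (List.any_eq_true.mpr ⟨c, hc, by simp [h]⟩) h2
        rcases lt_or_ge c K with h' | h'
        · exact ⟨h, h'⟩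
        · exact absurd (List.any_eq_true.mpr ⟨c, hc, by simp [h']⟩) h2
      rw [pv_loop_eq, Bool.eq_iff_iff]
      constructor
      · intro hA
        have hA' : ∀ g : Int, 0 ≤ g → g < K →
            pvGroupOK (pvA_adj edges) config (↑config.length) g = true := by
          intro g h0 hK
          exact List.all_eq_true.mp hA g (PySem.List.mem_pyRange_one.mpr ⟨h0, hK⟩)
        have hodd : ((PySem.Dict.counter config).values.any
            (fun cnt => decide (PySem.Int.mod cnt 2 ≠ 0))) ≠ true := by
          intro hcontra
          rw [pv_anyOdd] at hcontra
          obtain ⟨c, hc, hcount⟩ := hcontra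
          obtain ⟨h0, hK⟩ := hall c hc
          have hgOK := (pv_groupOK_iff _ _ _ _).mp (hA' c h0 hK)
          obtain ⟨k, hk, hck⟩ := List.mem_iff_getElem.mp hc
          have hmem : (↑k : Int) ∈ pvMembers config (↑config.length) c := by
            rw [pv_mem_members]
            refine ⟨Int.natCast_nonneg k, by exact_mod_cast hk, ?_⟩
            rw [PySem.List.pyGet?_natCast]
            simp [List.getElem?_eq_getElem hk, hck]
          rcases hgOK with hnil | ⟨heven, -⟩
          · rw [hnil] at hmem; simp at hmem
          · rw [pv_length_members] at heven; omega
        have hdeg : ∀ v : Int, 0 ≤ v → v < ↑config.length →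
            (pvB_deg config (pvB_edgeSet edges)).getD v 0 = 1 := by
          intro v h0 hv
          have hvg : PySem.List.pyGet? config v = some (config[v.toNat]'(by omega)) :=
            PySem.List.pyGet?_eq_some_getElem config h0 hv
          have hgc : (config[v.toNat]'(by omega)) ∈ config := List.getElem_mem _
          obtain ⟨hg0, hgK⟩ := hall _ hgc
          have hgOK := (pv_groupOK_iff _ _ _ _).mp (hA' _ hg0 hgK)
          have hmem : v ∈ pvMembers config (↑config.length) (config[v.toNat]'(by omega)) :=
            (pv_mem_members _ _ _).mpr ⟨h0, hv, hvg⟩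
          rcases hgOK with hnil | ⟨-, hcnt⟩
          · rw [hnil] at hmem; simp at hmem
          · have hone := hcnt v hmem
            rw [pv_deg_getD, ← pv_cnt_eq_deg edges config v _ hvg]
            exact_mod_cast hone
        rw [if_neg hodd, List.all_eq_true]
        intro v hv
        obtain ⟨h0, hn⟩ := PySem.List.mem_pyRange_one.mp hv
        simp [hdeg v h0 hn]
      · intro hB
        by_cases hoddB : ((PySem.Dict.counter config).values.any
            (fun cnt => decide (PySem.Int.mod cnt 2 ≠ 0))) = true
        · rw [if_pos hoddB] at hB
          exact absurd hB (by simp)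
        · rw [if_neg hoddB, List.all_eq_true] at hB
          rw [List.all_eq_true]
          intro g hgmem
          obtain ⟨hg0, hgK⟩ := PySem.List.mem_pyRange_one.mp hgmem
          rw [pv_groupOK_iff]
          by_cases hM : pvMembers config (↑config.length) g = []
          · exact Or.inl hM
          right
          obtain ⟨v0, hv0⟩ := List.exists_mem_of_ne_nil _ hM
          obtain ⟨h00, h0n, h0g⟩ := (pv_mem_members _ _ _).mp hv0
          have hgc : g ∈ config := by
            have hgval : (config[v0.toNat]'(by omega)) = g := by
              rw [PySem.List.pyGet?_eq_some_getElem config h00 h0n] at h0g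
              exact Option.some.inj h0g
            exact hgval ▸ List.getElem_mem _
          constructor
          · rw [pv_length_members]
            have h2' : config.count g % 2 = 0 := by
              by_contra hne
              exact hoddB ((pv_anyOdd config).mpr ⟨g, hgc, hne⟩)
            omega
          · intro w hw
            obtain ⟨hw0, hwn, hwg⟩ := (pv_mem_members _ _ _).mp hw
            have hall1 := hB w (PySem.List.mem_pyRange_one.mpr ⟨hw0, hwn⟩)
            rw [beq_iff_eq, pv_deg_getD, ← pv_cnt_eq_deg edges config w g hwg] at hall1
            exact_mod_cast hall1
  · simp [h1]
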